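-- pv_equiv track=rewrite | github.com/R-Santhir/AdventOfCode | day11/solvers.py | hasTwoRepeats
-- ===== SOURCE A (Python) =====
-- def hasTwoRepeats(password):
--     repCount = 0
--     skipChar = ''
--
--     for i in range(len(password)-1):
--         if i != skipChar:
--             if password[i] == password[i+1]:
--                 repCount += 1
--                 skipChar = i+1
--
--     if repCount == 2:
--         return True
--     else:
--         return False
-- ===== SOURCE B (Python) =====
-- def hasTwoRepeats(password):
--     total = 0
--     i = 0
--     n = len(password)
--     while i < n:
--         j = i
--         while j < n and password[j] == password[i]:
--             j += 1
--         total += (j - i) // 2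
--         i = j
--     return total == 2
-- ===== Notes on version B (the rewrite author's own statement) =====
-- stated objective: alternative
-- what changed: Replaces A's single stateful index scan (repCount plus a skipChar sentinel) with a run-length decomposition: an outer loop walks maximal runs of equal characters, an inner loop measures each run, run//2 pairs are added per run, and the total is compared to 2.
import Mathlib
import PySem

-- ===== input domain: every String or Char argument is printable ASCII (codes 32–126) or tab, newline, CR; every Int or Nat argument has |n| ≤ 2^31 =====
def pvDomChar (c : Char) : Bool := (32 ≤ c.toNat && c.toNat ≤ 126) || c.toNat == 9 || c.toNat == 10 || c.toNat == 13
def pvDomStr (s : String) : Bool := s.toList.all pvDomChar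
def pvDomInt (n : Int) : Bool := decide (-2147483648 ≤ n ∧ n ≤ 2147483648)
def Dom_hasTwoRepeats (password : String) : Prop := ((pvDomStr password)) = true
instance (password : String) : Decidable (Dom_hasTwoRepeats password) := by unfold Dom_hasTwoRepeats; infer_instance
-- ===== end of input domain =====

-- B replaces A's stateful skip-index scan with a recursive run-length decomposition
-- (run//2 pairs per maximal run of equal characters); same Bool on every string.

-- ===== PORT A =====
-- A's `skipChar` starts as '' and later holds an int index; modeled as Option Nat
-- (none = ''): Python's `i != skipChar` is always true while skipChar is ''.
def stepA (cs : List Char) (st : Nat × Option Nat) (i : Nat) : Nat × Option Nat :=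
  if some i ≠ st.2 then
    if cs.getD i ' ' = cs.getD (i + 1) ' ' then (st.1 + 1, some (i + 1)) else st
  else st

def hasTwoRepeats (password : String) : Bool :=
  let cs := password.toList
  let st := (List.range (cs.length - 1)).foldl (stepA cs) (0, none)
  st.1 == 2

-- ===== PORT B =====
-- inner while loop of Source B: length of the maximal prefix of cs equal to c (= j - i).
def runlen (cs : List Char) (c : Char) : Nat :=
  match cs with
  | [] => 0
  | x :: t => if x = c then 1 + runlen t c else 0

-- outer while loop of Source B as recursion on the remaining list: peel off the first
-- maximal run, add run // 2, continue after the run (i = j).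
def pairsRuns (cs : List Char) : Nat :=
  match cs with
  | [] => 0
  | c :: t => (1 + runlen t c) / 2 + pairsRuns (t.drop (runlen t c))
termination_by cs.length
decreasing_by
  simp only [List.length_drop, List.length_cons]; omega

def hasTwoRepeats_alt (password : String) : Bool :=
  pairsRuns password.toList == 2

-- ===== PRECONDITION & SPEC =====
def Spec_hasTwoRepeats (password : String) (out : Bool) : Prop := out = hasTwoRepeats_alt password
instance (password : String) (out : Bool) : Decidable (Spec_hasTwoRepeats password out) := by unfold Spec_hasTwoRepeats; infer_instance

-- ===== CLAIM (what is proved, stated in full; the proofs are below) =====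
def Claim_equal_hasTwoRepeats : Prop := ∀ (password : String), Dom_hasTwoRepeats password → Spec_hasTwoRepeats password (hasTwoRepeats password)

-- ===== LEMMAS AND PROOFS =====

-- Greedy non-overlapping pair count (A's scan as a recursion on the char list;
-- the Bool is A's "skip the next index" state).
def gA : Bool → List Char → Nat
  | _, [] => 0
  | _, [_] => 0
  | true, _ :: b :: t => gA false (b :: t)
  | false, a :: b :: t => if a = b then 1 + gA true (b :: t) else gA false (b :: t)

lemma gA_short (sk : Bool) (l : List Char) (h : l.length ≤ 1) : gA sk l = 0 := by
  match l with
  | [] => cases sk <;> rfl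
  | [_] => cases sk <;> rfl
  | _ :: _ :: _ => simp at h

-- A's fold over range equals the greedy recursion gA.
lemma foldA_inv (cs : List Char) : ∀ (m s c : Nat) (sk : Option Nat),
    s + m + 1 = cs.length →
    (sk = none ∨ ∃ k, sk = some k ∧ k ≤ s) →
    ((List.range' s m).foldl (stepA cs) (c, sk)).1
      = c + gA (decide (sk = some s)) (cs.drop s) := by
  intro m
  induction m with
  | zero =>
    intro s c sk hlen _
    have : (cs.drop s).length ≤ 1 := by simp [List.length_drop]; omega
    simp [gA_short _ _ this]
  | succ m ih =>
    intro s c sk hlen hinv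
    have hs : s < cs.length := by omega
    have hs1 : s + 1 < cs.length := by omega
    have hdrop : cs.drop s = cs[s] :: cs.drop (s + 1) := List.drop_eq_getElem_cons hs
    have hdrop1 : cs.drop (s + 1) = cs[s+1] :: cs.drop (s + 2) := List.drop_eq_getElem_cons hs1
    have hg : cs[s]? = some cs[s] := List.getElem?_eq_getElem hs
    have hg1 : cs[s+1]? = some cs[s+1] := List.getElem?_eq_getElem hs1
    rw [List.range'_succ, List.foldl_cons]
    by_cases hskip : sk = some s
    · subst hskip
      have hst : stepA cs (c, some s) s = (c, some s) := by simp [stepA]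
      have d1 : (decide ((some s : Option Nat) = some (s + 1))) = false := by simp
      have d2 : (decide ((some s : Option Nat) = some s)) = true := by simp
      rw [hst, ih (s + 1) c (some s) (by omega) (Or.inr ⟨s, rfl, by omega⟩),
        d1, d2, hdrop, hdrop1]
      rfl
    · have d4 : (decide (sk = some s)) = false := by simp [hskip]
      by_cases heq : cs[s]?.getD ' ' = cs[s+1]?.getD ' '
      · have hab : cs[s] = cs[s+1] := by rw [hg, hg1] at heq; simpa using heq
        have hst : stepA cs (c, sk) s = (c + 1, some (s + 1)) := by
          simp [stepA, List.getD, Ne.symm hskip, heq]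
        have d5 : (decide ((some (s + 1) : Option Nat) = some (s + 1))) = true := by simp
        rw [hst, ih (s + 1) (c + 1) (some (s + 1)) (by omega) (Or.inr ⟨s + 1, rfl, le_refl _⟩),
          d5, d4, hdrop, hdrop1]
        simp only [gA]
        rw [if_pos hab, Nat.add_assoc]
      · have hab : ¬ cs[s] = cs[s+1] := by rw [hg, hg1] at heq; simpa using heq
        have hst : stepA cs (c, sk) s = (c, sk) := by
          simp [stepA, List.getD, Ne.symm hskip, heq]
        have hsk1 : ¬ sk = some (s + 1) := by
          rcases hinv with h | ⟨k, hk, hle⟩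
          · simp [h]
          · subst hk; simp; omega
        have d6 : (decide (sk = some (s + 1))) = false := by simp [hsk1]
        rw [hst, ih (s + 1) c sk (by omega) (by
          rcases hinv with h | ⟨k, hk, hle⟩
          · exact Or.inl h
          · exact Or.inr ⟨k, hk, by omega⟩), d6, d4, hdrop, hdrop1]
        simp only [gA]
        rw [if_neg hab]

-- Inside one run of c: the greedy scan counts (1 + runlen t c) / 2 (flag false)
-- resp. (runlen t c) / 2 (flag true, the first char already paired), then
-- continues with flag false past the run.
lemma gA_run (t : List Char) : ∀ c : Char,
    (gA false (c :: t) = (1 + runlen t c) / 2 + gA false (t.drop (runlen t c))) ∧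
    (gA true (c :: t) = (runlen t c) / 2 + gA false (t.drop (runlen t c))) := by
  induction t with
  | nil => intro c; simp [gA, runlen]
  | cons b t' ih =>
    intro c
    by_cases hb : b = c
    · subst hb
      have hr : runlen (b :: t') b = 1 + runlen t' b := by simp [runlen]
      have hd : (b :: t').drop (1 + runlen t' b) = t'.drop (runlen t' b) := by
        rw [Nat.add_comm, List.drop_succ_cons]
      refine ⟨?_, ?_⟩
      · show (if b = b then 1 + gA true (b :: t') else gA false (b :: t'))
            = (1 + runlen (b :: t') b) / 2 + gA false ((b :: t').drop (runlen (b :: t') b))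
        rw [if_pos rfl, (ih b).2, hr, hd]; omega
      · show gA false (b :: t')
            = runlen (b :: t') b / 2 + gA false ((b :: t').drop (runlen (b :: t') b))
        rw [(ih b).1, hr, hd]
    · have hr : runlen (b :: t') c = 0 := by simp [runlen, hb]
      refine ⟨?_, ?_⟩
      · show (if c = b then 1 + gA true (b :: t') else gA false (b :: t'))
            = (1 + runlen (b :: t') c) / 2 + gA false ((b :: t').drop (runlen (b :: t') c))
        rw [if_neg (fun h => hb h.symm), hr]; simp
      · show gA false (b :: t')
            = runlen (b :: t') c / 2 + gA false ((b :: t').drop (runlen (b :: t') c))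
        rw [hr]; simp

-- The greedy scan equals the run-length decomposition.
lemma gA_eq_pairsRuns (cs : List Char) : gA false cs = pairsRuns cs := by
  induction hn : cs.length using Nat.strong_induction_on generalizing cs with
  | _ n ih =>
    match cs with
    | [] => simp [gA, pairsRuns]
    | c :: t =>
      have heq : pairsRuns (c :: t)
          = (1 + runlen t c) / 2 + pairsRuns (t.drop (runlen t c)) := by
        rw [pairsRuns.eq_def]
      have hlt : (t.drop (runlen t c)).length < n := by
        simp only [List.length_drop]
        subst hn
        simp only [List.length_cons]
        omega
      rw [(gA_run t c).1, heq, ih _ hlt _ rfl]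

lemma counts_eq (cs : List Char) :
    ((List.range (cs.length - 1)).foldl (stepA cs) (0, none)).1 = pairsRuns cs := by
  match cs with
  | [] => simp [pairsRuns]
  | h :: tl =>
    have hlen : (h :: tl).length - 1 = tl.length := by simp
    rw [hlen, List.range_eq_range']
    rw [foldA_inv (h :: tl) tl.length 0 0 none (by simp) (Or.inl rfl)]
    rw [← gA_eq_pairsRuns]
    simp

-- ===== VERDICT (by name: the statement is the Claim_ definition above) =====
theorem hasTwoRepeats_spec : Claim_equal_hasTwoRepeats := by
  intro password _
  unfold Spec_hasTwoRepeats hasTwoRepeats hasTwoRepeats_alt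
  simp only []
  rw [counts_eq password.toList]
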